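-- pv_equiv track=rewrite | github.com/RobbeW/Data_Statistiek_R | Deel 3 Algoritmiek/03 Hogere dimensie/Evaluatie/23 Kader maken/solution/solution.nl.py | kader
-- ===== SOURCE A (Python) =====
-- def kader(rooster, dikte):
--     aantal_r = len(rooster)
--     aantal_c = len(rooster[0])
--
--     nieuw = []
--     for r in range(aantal_r + 2 * dikte):
--         rij = []
--         for c in range(aantal_c + 2 * dikte):
--             element = 128
--             if dikte <= r < dikte + aantal_r and dikte <= c < dikte + aantal_c:
--                 element = rooster[r - dikte][c - dikte]
--             rij.append(element)
--         nieuw.append(rij)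
--
--     return nieuw
-- ===== SOURCE B (Python) =====
-- def kader(rooster, dikte):
--     ncols = len(rooster[0])
--     breedte = ncols + 2 * dikte
--     boven = [[128] * breedte for _ in range(dikte)]
--     midden = [[128] * dikte + list(rij[:ncols]) + [128] * dikte for rij in rooster]
--     onder = [[128] * breedte for _ in range(dikte)]
--     return boven + midden + onder
-- ===== Notes on version B (the rewrite author's own statement) =====
-- stated objective: simpler
-- what changed: Replaces the per-cell nested loop with a per-cell conditional by row-level list construction: dikte border rows of [128]*breedte, each original row as [128]*dikte + row[:ncols] + [128]*dikte, concatenated.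
-- outside the precondition, e.g. on kader([[1]], -1): A returns [], B returns [[1]]
import Mathlib
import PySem

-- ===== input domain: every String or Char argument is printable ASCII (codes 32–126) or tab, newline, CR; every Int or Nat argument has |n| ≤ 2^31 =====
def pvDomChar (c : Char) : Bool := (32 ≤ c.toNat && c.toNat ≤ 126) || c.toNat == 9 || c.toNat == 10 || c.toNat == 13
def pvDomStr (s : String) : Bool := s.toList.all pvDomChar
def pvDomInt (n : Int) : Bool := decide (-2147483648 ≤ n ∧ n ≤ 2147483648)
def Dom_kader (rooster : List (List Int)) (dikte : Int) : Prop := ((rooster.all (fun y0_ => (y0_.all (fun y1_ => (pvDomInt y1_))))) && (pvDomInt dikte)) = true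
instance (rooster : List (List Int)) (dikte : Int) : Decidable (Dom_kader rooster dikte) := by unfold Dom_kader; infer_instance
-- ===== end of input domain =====

-- B builds the framed grid by row-level list construction (border rows + padded copies of the
-- original rows) instead of A's per-cell nested loop with a conditional; same return value on Pre_.

-- ===== PORT A =====
def kader (rooster : List (List Int)) (dikte : Int) : List (List Int) :=
  let aantal_r : Int := rooster.length
  let aantal_c : Int := (PySem.List.pyGetD rooster 0 []).length
  (PySem.List.pyRange 0 (aantal_r + 2 * dikte) 1).foldl (fun nieuw r =>
    let rij := (PySem.List.pyRange 0 (aantal_c + 2 * dikte) 1).foldl (fun rij c =>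
      let element : Int := 128
      let element := if dikte ≤ r ∧ r < dikte + aantal_r ∧ dikte ≤ c ∧ c < dikte + aantal_c
        then PySem.List.pyGetD (PySem.List.pyGetD rooster (r - dikte) []) (c - dikte) 0
        else element
      rij ++ [element]) ([] : List Int)
    nieuw ++ [rij]) ([] : List (List Int))

-- ===== PORT B =====
def kader_alt (rooster : List (List Int)) (dikte : Int) : List (List Int) :=
  let ncols : Int := (PySem.List.pyGetD rooster 0 []).length
  let breedte : Int := ncols + 2 * dikte
  let boven := List.replicate dikte.toNat (List.replicate breedte.toNat (128 : Int))
  let midden := rooster.map (fun rij =>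
    List.replicate dikte.toNat (128 : Int) ++ PySem.List.slice rij none (some ncols)
      ++ List.replicate dikte.toNat (128 : Int))
  let onder := List.replicate dikte.toNat (List.replicate breedte.toNat (128 : Int))
  boven ++ midden ++ onder

-- ===== PRECONDITION & SPEC =====
-- Pre_ excludes: the empty rooster and roosters whose later rows are shorter than the first
-- (A raises IndexError there), and negative dikte — a border thickness is naturally ≥ 0, and
-- there A returns a cropped or empty grid that is an artefact of its index arithmetic.
def Pre_kader (rooster : List (List Int)) (dikte : Int) : Prop :=
  0 ≤ dikte ∧ rooster ≠ [] ∧ ∀ rij ∈ rooster, (rooster.headI).length ≤ rij.length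
instance (rooster : List (List Int)) (dikte : Int) : Decidable (Pre_kader rooster dikte) := by
  unfold Pre_kader; infer_instance
def pvWitness_kader : List (List Int) × Int := ([[1, 2], [3, 4]], 1)

def Spec_kader (rooster : List (List Int)) (dikte : Int) (out : List (List Int)) : Prop := out = kader_alt rooster dikte
instance (rooster : List (List Int)) (dikte : Int) (out : List (List Int)) : Decidable (Spec_kader rooster dikte out) := by unfold Spec_kader; infer_instance

-- ===== CLAIM (what is proved, stated in full; the proofs are below) =====
def Claim_equal_kader : Prop := ∀ (rooster : List (List Int)) (dikte : Int), Dom_kader rooster dikte → Pre_kader rooster dikte → Spec_kader rooster dikte (kader rooster dikte)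

-- ===== LEMMAS AND PROOFS =====
lemma map_const_pyRange {α : Type} (a b : Int) (x : α) :
    (PySem.List.pyRange a b 1).map (fun _ => x) = List.replicate (b - a).toNat x := by
  rw [List.map_const', PySem.List.length_pyRange_one]

lemma map_pyRange_shift {α β : Type} (xs : List α) (a : Int) (f : Int → β) (g : α → β)
    (h : ∀ (i : Nat) (hi : i < xs.length), f (a + i) = g xs[i]) :
    (PySem.List.pyRange a (a + xs.length) 1).map f = xs.map g := by
  rw [PySem.List.pyRange_one, show (a + (xs.length : Int) - a).toNat = xs.length by omega,
    List.map_map]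
  apply List.ext_getElem (by simp)
  intro i h1 h2
  simp only [List.getElem_map, List.getElem_range, Function.comp]
  exact h i (by simpa using h2)

lemma kader_eq_map (rooster : List (List Int)) (dikte : Int) :
    kader rooster dikte =
      (PySem.List.pyRange 0 ((rooster.length : Int) + 2 * dikte) 1).map (fun r =>
        (PySem.List.pyRange 0 (((PySem.List.pyGetD rooster 0 []).length : Int) + 2 * dikte) 1).map (fun c =>
          if dikte ≤ r ∧ r < dikte + rooster.length ∧ dikte ≤ c ∧ c < dikte + (PySem.List.pyGetD rooster 0 []).length
          then PySem.List.pyGetD (PySem.List.pyGetD rooster (r - dikte) []) (c - dikte) 0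
          else 128)) := by
  simp only [kader, PySem.List.foldl_append_singleton_eq_map, List.nil_append]

-- ===== VERDICT (by name: the statement is the Claim_ definition above) =====
theorem kader_spec : Claim_equal_kader := by
  intro rooster dikte _ hpre
  unfold Pre_kader at hpre
  unfold Spec_kader
  obtain ⟨hd, hne, hrows⟩ := hpre
  obtain ⟨n, rfl⟩ := Int.eq_ofNat_of_zero_le hd
  rcases rooster with _ | ⟨r0, rest⟩
  · exact absurd rfl hne
  have h0 : PySem.List.pyGetD (r0 :: rest) (0 : Int) ([] : List Int) = r0 := by
    simp
  rw [kader_eq_map]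
  simp only [h0, kader_alt, Int.toNat_natCast]
  rw [PySem.List.pyRange_one_append 0 (↑n) ((((r0 :: rest : List (List Int)).length : Int)) + 2 * ↑n) (by omega) (by omega),
      PySem.List.pyRange_one_append (↑n) ((↑n : Int) + ((r0 :: rest : List (List Int)).length : Int)) ((((r0 :: rest : List (List Int)).length : Int)) + 2 * ↑n) (by omega) (by omega),
      List.map_append, List.map_append, List.append_assoc]
  have hrowc : ∀ r : Int, ¬((↑n : Int) ≤ r ∧ r < ↑n + ((r0 :: rest : List (List Int)).length : Int)) →
      List.map (fun c => if (↑n : Int) ≤ r ∧ r < ↑n + ((r0 :: rest : List (List Int)).length : Int) ∧ (↑n : Int) ≤ c ∧ c < ↑n + (r0.length : Int) then PySem.List.pyGetD (PySem.List.pyGetD (r0 :: rest) (r - ↑n) []) (c - ↑n) 0 else 128) (PySem.List.pyRange 0 ((r0.length : Int) + 2 * ↑n) 1)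
      = List.replicate ((r0.length : Int) + 2 * (↑n : Int)).toNat (128 : Int) := by
    intro r hr
    rw [List.map_congr_left (g := fun _ => (128 : Int)) (fun c _ => by rw [if_neg]; tauto),
        map_const_pyRange]
    norm_num
  congr 1
  · rw [List.map_congr_left (g := fun _ => List.replicate ((r0.length : Int) + 2 * (↑n : Int)).toNat (128 : Int))
        (fun r hr => hrowc r (by rw [PySem.List.mem_pyRange_one] at hr; omega)),
        map_const_pyRange]
    norm_num
  congr 1
  · apply map_pyRange_shift
    intro i hi
    have hCle : r0.length ≤ ((r0 :: rest)[i]).length := by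
      simpa using hrows _ (List.getElem_mem hi)
    have hidx : ((n : Int) + ↑i - ↑n) = (i : Int) := by ring
    have hrowi : (r0 :: rest).getD i ([] : List Int) = (r0 :: rest)[i] :=
      List.getD_eq_getElem _ _ hi
    simp only [hidx, PySem.List.pyGetD_natCast, hrowi]
    rw [PySem.List.pyRange_one_append 0 (↑n) ((r0.length : Int) + 2 * ↑n) (by omega) (by omega),
        PySem.List.pyRange_one_append (↑n) ((↑n : Int) + (r0.length : Int)) ((r0.length : Int) + 2 * ↑n) (by omega) (by omega),
        List.map_append, List.map_append, List.append_assoc]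
    congr 1
    · rw [List.map_congr_left (g := fun _ => (128 : Int))
          (fun c hc => by rw [if_neg]; rw [PySem.List.mem_pyRange_one] at hc; omega),
          map_const_pyRange]
      norm_num
    congr 1
    · rw [PySem.List.slice_to _ (by omega), Int.toNat_natCast]
      apply List.ext_getElem
      · simp [PySem.List.length_pyRange_one]
        omega
      · intro j h1 h2
        have hj : j < r0.length := by
          simp [PySem.List.length_pyRange_one] at h1
          omega
        simp only [List.getElem_map, PySem.List.getElem_pyRange_one, List.getElem_take]
        rw [if_pos ⟨by omega, by omega, by omega, by omega⟩,
            show ((n : Int) + ↑j - ↑n) = (j : Int) by ring,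
            PySem.List.pyGetD_natCast, List.getD_eq_getElem _ _ (by omega)]
    · rw [List.map_congr_left (g := fun _ => (128 : Int))
          (fun c hc => by rw [if_neg]; rw [PySem.List.mem_pyRange_one] at hc; omega),
          map_const_pyRange]
      congr 1
      omega
  · rw [List.map_congr_left (g := fun _ => List.replicate ((r0.length : Int) + 2 * (↑n : Int)).toNat (128 : Int))
        (fun r hr => hrowc r (by rw [PySem.List.mem_pyRange_one] at hr; omega)),
        map_const_pyRange]
    congr 1
    omega
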